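-- pv_equiv track=rewrite | github.com/DagonLee/codingtest | boj16968.py | car
-- ===== SOURCE A (Python) =====
-- def car(num, idx, prev):
-- 	if idx == len(num):
-- 		return 1
-- 	start = ord('a') if num[idx] == 'c' else ord('0')
-- 	end = ord('z') if num[idx] == 'c' else ord('9')
-- 	ans = 0
-- 	for i in range(start, end + 1):
-- 		if i == prev:
-- 			continue
-- 		ans += car(num, idx + 1, i)
-- 	return ans
-- ===== SOURCE B (Python) =====
-- def car(num, idx, prev):
--     n = len(num)
--     ans = 1
--     p = prev
--     for k in range(idx, n):
--         if num[k] == 'c':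
--             lo, hi, size = ord('a'), ord('z'), 26
--         else:
--             lo, hi, size = ord('0'), ord('9'), 10
--         ans *= size - (1 if lo <= p <= hi else 0)
--         p = lo
--     return ans
-- ===== Notes on version B (the rewrite author's own statement) =====
-- stated objective: alternative
-- what changed: replaces the exponential branch-per-candidate recursion with a single left-to-right pass that multiplies per-position choice counts (26 or 10, minus 1 when the previous choice lies in the current range)
import Mathlib
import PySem

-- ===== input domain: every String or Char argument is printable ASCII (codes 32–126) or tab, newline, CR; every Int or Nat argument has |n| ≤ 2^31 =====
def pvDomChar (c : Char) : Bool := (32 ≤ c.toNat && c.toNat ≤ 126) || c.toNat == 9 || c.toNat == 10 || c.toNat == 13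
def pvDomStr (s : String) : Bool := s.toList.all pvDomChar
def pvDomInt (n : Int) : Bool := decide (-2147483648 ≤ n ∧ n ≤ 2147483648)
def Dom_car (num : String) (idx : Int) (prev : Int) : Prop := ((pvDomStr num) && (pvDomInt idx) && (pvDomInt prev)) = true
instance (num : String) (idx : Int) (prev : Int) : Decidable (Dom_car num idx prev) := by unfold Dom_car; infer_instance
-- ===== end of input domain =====

-- B replaces A's branch-per-candidate recursion by a one-pass product of per-position choice counts.
-- Equivalence is claimed on Pre_car (indices where Python A does not raise IndexError).

-- ===== PORT A =====
-- literal port of A's recursion; the `else 0` branch is only reached where Python A raises (idx > len)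
def carA (num : List Char) (idx : Int) (prev : Int) : Int :=
  if idx = (num.length : Int) then 1
  else if h : idx < (num.length : Int) then
    let c := PySem.List.pyGetD num idx ' '
    let start : Int := if c = 'c' then 97 else 48
    let e : Int := if c = 'c' then 122 else 57
    (PySem.List.pyRange start (e + 1) 1).foldl
      (fun ans i => if i = prev then ans else ans + carA num (idx + 1) i) 0
  else 0
termination_by ((num.length : Int) - idx).toNat
decreasing_by omega

def car (num : String) (idx : Int) (prev : Int) : Int :=
  carA num.toList idx prev

-- ===== PORT B =====
-- loop body of Source B: state = (ans, p)
def carStep (num : List Char) (st : Int × Int) (k : Int) : Int × Int :=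
  let c := PySem.List.pyGetD num k ' '
  if c = 'c' then (st.1 * (26 - (if 97 ≤ st.2 ∧ st.2 ≤ 122 then 1 else 0)), 97)
  else (st.1 * (10 - (if 48 ≤ st.2 ∧ st.2 ≤ 57 then 1 else 0)), 48)

def car_alt (num : String) (idx : Int) (prev : Int) : Int :=
  ((PySem.List.pyRange idx (num.toList.length : Int) 1).foldl (carStep num.toList) (1, prev)).1

-- ===== PRECONDITION & SPEC =====
-- Pre_ excludes exactly the indices where Python A raises IndexError (num[idx] out of range).
def Pre_car (num : String) (idx : Int) (prev : Int) : Prop :=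
  -(num.toList.length : Int) ≤ idx ∧ idx ≤ (num.toList.length : Int)
instance (num : String) (idx : Int) (prev : Int) : Decidable (Pre_car num idx prev) := by
  unfold Pre_car; infer_instance

def pvWitness_car : String × Int × Int := ("c7a", 0, 97)

def Spec_car (num : String) (idx : Int) (prev : Int) (out : Int) : Prop := out = car_alt num idx prev
instance (num : String) (idx : Int) (prev : Int) (out : Int) : Decidable (Spec_car num idx prev out) := by
  unfold Spec_car; infer_instance

-- ===== CLAIM (what is proved, stated in full; the proofs are below) =====
def Claim_equal_car : Prop := ∀ (num : String) (idx : Int) (prev : Int), Dom_car num idx prev → Pre_car num idx prev → Spec_car num idx prev (car num idx prev)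

-- ===== LEMMAS AND PROOFS =====

-- the accumulator of B's loop is a pure scale factor
theorem carStep_scale (num : List Char) (ks : List Int) :
    ∀ (a p : Int), (ks.foldl (carStep num) (a, p)).1 = a * (ks.foldl (carStep num) (1, p)).1 := by
  induction ks with
  | nil => intro a p; simp
  | cons k rest ih =>
    intro a p
    simp only [List.foldl_cons, carStep]
    split_ifs <;>
      · rw [ih, ih (1 * _)]; ring

-- B's tail value depends on prev only through the two range-membership indicators
theorem carStep_congr (num : List Char) (ks : List Int) (p q : Int)
    (h1 : (97 ≤ p ∧ p ≤ 122) ↔ (97 ≤ q ∧ q ≤ 122))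
    (h2 : (48 ≤ p ∧ p ≤ 57) ↔ (48 ≤ q ∧ q ≤ 57)) :
    (ks.foldl (carStep num) (1, p)).1 = (ks.foldl (carStep num) (1, q)).1 := by
  cases ks with
  | nil => rfl
  | cons k rest =>
    have e1 : (if 97 ≤ p ∧ p ≤ 122 then (1:Int) else 0) = (if 97 ≤ q ∧ q ≤ 122 then 1 else 0) := by
      by_cases hp : 97 ≤ p ∧ p ≤ 122
      · rw [if_pos hp, if_pos (h1.mp hp)]
      · rw [if_neg hp, if_neg (fun h => hp (h1.mpr h))]
    have e2 : (if 48 ≤ p ∧ p ≤ 57 then (1:Int) else 0) = (if 48 ≤ q ∧ q ≤ 57 then 1 else 0) := by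
      by_cases hp : 48 ≤ p ∧ p ≤ 57
      · rw [if_pos hp, if_pos (h2.mp hp)]
      · rw [if_neg hp, if_neg (fun h => hp (h2.mpr h))]
    simp only [List.foldl_cons, carStep, e1, e2]

-- A's inner loop with a constant summand is a count times the summand
theorem sum_const (prev C : Int) (n : Nat) :
    ∀ (a b s : Int), (b - a).toNat = n → a ≤ b →
      (PySem.List.pyRange a b 1).foldl (fun ans i => if i = prev then ans else ans + C) s
        = s + (b - a - (if a ≤ prev ∧ prev < b then 1 else 0)) * C := by
  induction n with
  | zero =>
    intro a b s hn hab
    have hba : b = a := by omega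
    subst hba
    rw [PySem.List.pyRange_one_eq_nil (by omega)]
    simp
  | succ m ih =>
    intro a b s hn hab
    have hlt : a < b := by omega
    rw [PySem.List.pyRange_one_cons hlt]
    simp only [List.foldl_cons]
    by_cases hp : a = prev
    · subst hp
      rw [if_pos rfl, ih (a + 1) b s (by omega) (by omega)]
      rw [if_neg (by omega : ¬ (a + 1 ≤ a ∧ a < b)), if_pos (⟨le_refl a, hlt⟩ : a ≤ a ∧ a < b)]
      ring
    · rw [if_neg hp, ih (a + 1) b (s + C) (by omega) (by omega)]
      have heq : (if a + 1 ≤ prev ∧ prev < b then (1:Int) else 0)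
          = (if a ≤ prev ∧ prev < b then (1:Int) else 0) := by
        by_cases h : a + 1 ≤ prev ∧ prev < b
        · rw [if_pos h, if_pos (by omega)]
        · by_cases h' : a ≤ prev ∧ prev < b
          · exfalso; omega
          · rw [if_neg h, if_neg h']
      rw [heq]; ring

-- main equivalence, by induction on the distance to the end of the string
theorem carA_eq (num : List Char) (m : Nat) :
    ∀ (idx prev : Int), ((num.length : Int) - idx).toNat = m →
      -(num.length : Int) ≤ idx → idx ≤ (num.length : Int) →
      carA num idx prev
        = ((PySem.List.pyRange idx (num.length : Int) 1).foldl (carStep num) (1, prev)).1 := by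
  induction m with
  | zero =>
    intro idx prev hm _ hle
    have : idx = (num.length : Int) := by omega
    subst this
    rw [carA, if_pos rfl, PySem.List.pyRange_one_eq_nil (by omega)]
    simp
  | succ m ih =>
    intro idx prev hm hlo hhi
    have hlt : idx < (num.length : Int) := by omega
    rw [carA, if_neg (by omega), dif_pos hlt]
    rw [PySem.List.pyRange_one_cons hlt]
    simp only [List.foldl_cons]
    set c := PySem.List.pyGetD num idx ' ' with hc
    by_cases hcc : c = 'c'
    · -- letter position: range 97..122
      rw [if_pos hcc]
      simp only [carStep, ← hc, if_pos hcc]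
      have hbody : (PySem.List.pyRange 97 (122 + 1) 1).foldl
            (fun ans i => if i = prev then ans else ans + carA num (idx + 1) i) 0
          = (PySem.List.pyRange 97 (122 + 1) 1).foldl
            (fun ans i => if i = prev then ans
              else ans + ((PySem.List.pyRange (idx + 1) (num.length : Int) 1).foldl (carStep num) (1, 97)).1) 0 := by
        apply PySem.List.foldl_congr_mem
        intro acc x hx
        have hx' : 97 ≤ x ∧ x < 123 := (PySem.List.mem_pyRange_one).mp hx
        by_cases hxp : x = prev
        · simp [hxp]
        · rw [if_neg hxp, if_neg hxp]
          congr 1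
          rw [ih (idx + 1) x (by omega) (by omega) (by omega)]
          exact carStep_congr num _ x 97 (by omega) (by omega)
      rw [hbody, sum_const prev _ 26 97 (122 + 1) 0 (by decide) (by decide)]
      rw [carStep_scale num _ (1 * (26 - if 97 ≤ prev ∧ prev ≤ 122 then 1 else 0)) 97]
      by_cases hp : 97 ≤ prev ∧ prev ≤ 122
      · rw [if_pos (by omega : 97 ≤ prev ∧ prev < 122 + 1), if_pos hp]; ring
      · rw [if_neg (by omega : ¬ (97 ≤ prev ∧ prev < 122 + 1)), if_neg hp]; ring
    · -- digit position: range 48..57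
      rw [if_neg hcc]
      simp only [carStep, ← hc, if_neg hcc]
      have hbody : (PySem.List.pyRange 48 (57 + 1) 1).foldl
            (fun ans i => if i = prev then ans else ans + carA num (idx + 1) i) 0
          = (PySem.List.pyRange 48 (57 + 1) 1).foldl
            (fun ans i => if i = prev then ans
              else ans + ((PySem.List.pyRange (idx + 1) (num.length : Int) 1).foldl (carStep num) (1, 48)).1) 0 := by
        apply PySem.List.foldl_congr_mem
        intro acc x hx
        have hx' : 48 ≤ x ∧ x < 58 := (PySem.List.mem_pyRange_one).mp hx
        by_cases hxp : x = prev
        · simp [hxp]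
        · rw [if_neg hxp, if_neg hxp]
          congr 1
          rw [ih (idx + 1) x (by omega) (by omega) (by omega)]
          exact carStep_congr num _ x 48 (by omega) (by omega)
      rw [hbody, sum_const prev _ 10 48 (57 + 1) 0 (by decide) (by decide)]
      rw [carStep_scale num _ (1 * (10 - if 48 ≤ prev ∧ prev ≤ 57 then 1 else 0)) 48]
      by_cases hp : 48 ≤ prev ∧ prev ≤ 57
      · rw [if_pos (by omega : 48 ≤ prev ∧ prev < 57 + 1), if_pos hp]; ring
      · rw [if_neg (by omega : ¬ (48 ≤ prev ∧ prev < 57 + 1)), if_neg hp]; ring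

-- ===== VERDICT (by name: the statement is the Claim_ definition above) =====
theorem car_spec : Claim_equal_car := by
  intro num idx prev _ hpre
  unfold Spec_car car car_alt
  exact carA_eq num.toList _ idx prev rfl hpre.1 hpre.2
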